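-- pv_equiv track=rewrite | github.com/stardom1957/astrodm | test_tupples_dates_v6.py | interval_de_sessions
-- ===== SOURCE A (Python) =====
-- def interval_de_sessions(listeDeTuples):
--     if len(listeDeTuples) >= 2:
--         borne_sup = len(listeDeTuples) - 1
--         delai = abs(listeDeTuples[borne_sup][1] - listeDeTuples[0][1])
--         if delai > 7:
--             listeDeTuples.pop(len(listeDeTuples)-1)
--             #listeDeTuples.pop(0)
--             return interval_de_sessions(listeDeTuples)
--         else:
--             return listeDeTuples
--     else:
--         return listeDeTuples
-- ===== SOURCE B (Python) =====
-- def interval_de_sessions(listeDeTuples):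
--     # Single backward scan for the cut index, then one truncation (in place,
--     # same mutation of the argument as the original's repeated pop()).
--     if not listeDeTuples:
--         return listeDeTuples
--     f = listeDeTuples[0][1]
--     i = len(listeDeTuples) - 1
--     while abs(listeDeTuples[i][1] - f) > 7:
--         i -= 1  # index 0 always satisfies (|f - f| = 0), so this stops
--     del listeDeTuples[i + 1:]
--     return listeDeTuples
-- ===== Notes on version B (the rewrite author's own statement) =====
-- stated objective: alternative
-- what changed: Replaces the tail-recursive repeated pop() with a single non-mutating backward index scan that finds the cut point, followed by one slice deletion (no recursion, no repeated pop/len calls).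
import Mathlib
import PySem

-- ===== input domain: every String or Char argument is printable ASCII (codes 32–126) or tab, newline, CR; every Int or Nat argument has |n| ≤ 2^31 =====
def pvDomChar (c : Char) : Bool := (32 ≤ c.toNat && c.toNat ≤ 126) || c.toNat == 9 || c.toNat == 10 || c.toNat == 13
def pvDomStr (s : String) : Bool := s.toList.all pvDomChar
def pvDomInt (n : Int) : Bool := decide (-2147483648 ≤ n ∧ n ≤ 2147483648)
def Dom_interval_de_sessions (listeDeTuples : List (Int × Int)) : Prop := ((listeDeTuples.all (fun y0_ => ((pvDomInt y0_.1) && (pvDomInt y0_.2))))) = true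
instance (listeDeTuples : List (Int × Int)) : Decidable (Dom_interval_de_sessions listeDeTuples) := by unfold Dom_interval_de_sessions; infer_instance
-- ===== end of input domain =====

-- B replaces A's tail-recursive repeated pop() with a single backward scan for the cut
-- index followed by one truncation (alternative decomposition; return-value equivalence —
-- both Pythons mutate the argument in place, ending with the same list contents).


-- ===== PORT A =====
-- listeDeTuples[i][1] is always in range here, so List.getD is exact for the Python indexing
def interval_de_sessions (listeDeTuples : List (Int × Int)) : List (Int × Int) :=
  if _h : listeDeTuples.length ≥ 2 then
    let borne_sup := listeDeTuples.length - 1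
    let delai := |(listeDeTuples.getD borne_sup (0, 0)).2 - (listeDeTuples.getD 0 (0, 0)).2|
    if delai > 7 then
      interval_de_sessions listeDeTuples.dropLast
    else
      listeDeTuples
  else
    listeDeTuples
termination_by listeDeTuples.length
decreasing_by simp [List.length_dropLast]; omega

-- ===== PORT B =====
-- Source B's backward `while` scan: largest index i (counting down from the end) with
-- |l[i][1] - f| ≤ 7; index 0 always satisfies it (|f - f| = 0), so the scan is total
def scanIdx (l : List (Int × Int)) (f : Int) : Nat → Nat
  | 0 => 0
  | i + 1 => if |(l.getD (i + 1) (0, 0)).2 - f| > 7 then scanIdx l f i else i + 1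

def interval_de_sessions_alt (listeDeTuples : List (Int × Int)) : List (Int × Int) :=
  match listeDeTuples with
  | [] => []
  | x :: rest =>
    let f := x.2
    (x :: rest).take (scanIdx (x :: rest) f ((x :: rest).length - 1) + 1)

-- ===== PRECONDITION & SPEC =====
def Spec_interval_de_sessions (listeDeTuples : List (Int × Int)) (out : List (Int × Int)) : Prop := out = interval_de_sessions_alt listeDeTuples
instance (listeDeTuples : List (Int × Int)) (out : List (Int × Int)) : Decidable (Spec_interval_de_sessions listeDeTuples out) := by unfold Spec_interval_de_sessions; infer_instance

-- ===== CLAIM (what is proved, stated in full; the proofs are below) =====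
def Claim_equal_interval_de_sessions : Prop := ∀ (listeDeTuples : List (Int × Int)), Dom_interval_de_sessions listeDeTuples → Spec_interval_de_sessions listeDeTuples (interval_de_sessions listeDeTuples)

-- ===== LEMMAS AND PROOFS =====
lemma scanIdx_le (l : List (Int × Int)) (f : Int) (i : Nat) : scanIdx l f i ≤ i := by
  induction i with
  | zero => simp [scanIdx]
  | succ i ih => simp only [scanIdx]; split <;> omega

lemma getD_dropLast (l : List (Int × Int)) (i : Nat) (h : i < l.length - 1) :
    l.dropLast.getD i (0, 0) = l.getD i (0, 0) := by
  have h1 : i < l.dropLast.length := by simp [List.length_dropLast]; omega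
  have h2 : i < l.length := by omega
  rw [List.getD_eq_getElem _ _ h1, List.getD_eq_getElem _ _ h2]
  exact List.getElem_dropLast h1

lemma scanIdx_dropLast (l : List (Int × Int)) (f : Int) (i : Nat) (h : i < l.length - 1) :
    scanIdx l.dropLast f i = scanIdx l f i := by
  induction i with
  | zero => simp [scanIdx]
  | succ i ih =>
    simp only [scanIdx, getD_dropLast l (i + 1) h]
    rw [ih (by omega)]

lemma main_lemma (l : List (Int × Int)) (x : Int × Int) (rest : List (Int × Int))
    (hl : l = x :: rest) :
    interval_de_sessions l = l.take (scanIdx l x.2 (l.length - 1) + 1) := by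
  induction l using interval_de_sessions.induct generalizing x rest with
  | case1 l h borne_sup delai hgt ih =>
    subst hl
    have hlen : rest.length ≥ 1 := by simp at h; omega
    obtain ⟨j, hj⟩ : ∃ j, rest.length = j + 1 := ⟨rest.length - 1, by omega⟩
    have hL : (x :: rest).length - 1 = j + 1 := by simp [hj]
    have hgt' : |((x :: rest).getD (j + 1) (0, 0)).2 - x.2| > 7 := by
      have hg : |((x :: rest).getD ((x :: rest).length - 1) (0, 0)).2 - ((x :: rest).getD 0 (0, 0)).2| > 7 := hgt
      rw [hL] at hg
      simpa [List.getD] using hg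
    have hstep : scanIdx (x :: rest) x.2 (j + 1) = scanIdx (x :: rest) x.2 j := by
      simp only [scanIdx]
      rw [if_pos hgt']
    obtain ⟨y, rest', hr⟩ : ∃ y rest', rest = y :: rest' := by
      cases rest with
      | nil => simp at hj
      | cons y rest' => exact ⟨y, rest', rfl⟩
    have hdl : (x :: rest).dropLast = x :: rest.dropLast := by subst hr; simp
    rw [interval_de_sessions]
    rw [dif_pos h, if_pos hgt]
    rw [ih x rest.dropLast hdl]
    have hL2 : ((x :: rest).dropLast).length - 1 = j := by
      simp [List.length_dropLast, hj]
    rw [hL2]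
    have hscan : scanIdx ((x :: rest).dropLast) x.2 j = scanIdx (x :: rest) x.2 j := by
      apply scanIdx_dropLast
      simp [hj]
    rw [hscan, hL, hstep]
    have hb : scanIdx (x :: rest) x.2 j + 1 ≤ j + 1 := by
      have := scanIdx_le (x :: rest) x.2 j
      omega
    rw [List.dropLast_eq_take, List.take_take]
    congr 1
    simp [hj]
    omega
  | case2 l h borne_sup delai hle =>
    subst hl
    have hlen : rest.length ≥ 1 := by simp at h; omega
    obtain ⟨j, hj⟩ : ∃ j, rest.length = j + 1 := ⟨rest.length - 1, by omega⟩
    have hL : (x :: rest).length - 1 = j + 1 := by simp [hj]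
    have hle' : ¬ |((x :: rest).getD (j + 1) (0, 0)).2 - x.2| > 7 := by
      have hg : ¬ |((x :: rest).getD ((x :: rest).length - 1) (0, 0)).2 - ((x :: rest).getD 0 (0, 0)).2| > 7 := hle
      rw [hL] at hg
      simpa [List.getD] using hg
    rw [interval_de_sessions]
    rw [dif_pos h, if_neg hle]
    rw [hL]
    simp only [scanIdx]
    rw [if_neg hle']
    rw [List.take_of_length_le (by simp [hj])]
  | case3 l h =>
    subst hl
    cases rest with
    | nil => simp [interval_de_sessions, scanIdx]
    | cons y r => exfalso; apply h; simp

-- ===== VERDICT (by name: the statement is the Claim_ definition above) =====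
theorem interval_de_sessions_spec : Claim_equal_interval_de_sessions := by
  intro l _
  unfold Spec_interval_de_sessions interval_de_sessions_alt
  cases l with
  | nil => rw [interval_de_sessions]; simp
  | cons x rest => exact main_lemma (x :: rest) x rest rfl
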